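-- pv_equiv track=rewrite | github.com/muellermichel/Hybrid-Fortran | hf/models/symbol.py | getReorderedDomainsAccordingToDeclaration
-- ===== SOURCE A (Python) =====
-- def getReorderedDomainsAccordingToDeclaration(domains, dimensionSizesInDeclaration):
-- 	def getNextUnusedIndexForDimensionSize(domainSize, dimensionSizesInDeclaration, usedIndices):
-- 		index_candidate = None
-- 		startAt = 0
-- 		while True:
-- 			if startAt > len(dimensionSizesInDeclaration) - 1:
-- 				return None
-- 			try:
-- 				index_candidate = dimensionSizesInDeclaration[startAt:].index(domainSize) + startAt
-- 			except ValueError: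
-- 				return None #example: happens when domains are declared for allocatables with :
-- 			if index_candidate in usedIndices:
-- 				startAt = index_candidate + 1
-- 			else:
-- 				break
-- 		return index_candidate
--
-- 	if not dimensionSizesInDeclaration:
-- 		return domains
-- 	if len(domains) == 0:
-- 		return domains
-- 	if len(domains) != len(dimensionSizesInDeclaration):
-- 		return domains
--
-- 	reorderedDomains = [0] * len(domains)
-- 	usedIndices = []
-- 	fallBackToCurrentOrder = False
-- 	for (domainName, domainSize) in domains:
-- 		index = getNextUnusedIndexForDimensionSize(domainSize, dimensionSizesInDeclaration, usedIndices)
-- 		if index == None: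
-- 			fallBackToCurrentOrder = True
-- 			break
-- 		usedIndices.append(index)
-- 		reorderedDomains[index] = (domainName, domainSize)
-- 	if fallBackToCurrentOrder:
-- 		return domains
-- 	return reorderedDomains
-- ===== SOURCE B (Python) =====
-- def getReorderedDomainsAccordingToDeclaration(domains, dimensionSizesInDeclaration):
-- 	if not dimensionSizesInDeclaration or len(domains) != len(dimensionSizesInDeclaration):
-- 		return domains
-- 	queues = {}
-- 	for i, size in enumerate(dimensionSizesInDeclaration):
-- 		queues.setdefault(size, []).append(i)
-- 	reordered = [None] * len(domains)
-- 	for (domainName, domainSize) in domains: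
-- 		queue = queues.get(domainSize)
-- 		if not queue:
-- 			return domains
-- 		reordered[queue.pop(0)] = (domainName, domainSize)
-- 	return reordered
-- ===== Notes on version B (the rewrite author's own statement) =====
-- stated objective: alternative
-- what changed: replaces A's per-domain repeated list-slice .index scans over dimensionSizesInDeclaration with a single pass that groups declaration indices into per-size FIFO queues and pops the earliest index for each domain
import Mathlib
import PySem

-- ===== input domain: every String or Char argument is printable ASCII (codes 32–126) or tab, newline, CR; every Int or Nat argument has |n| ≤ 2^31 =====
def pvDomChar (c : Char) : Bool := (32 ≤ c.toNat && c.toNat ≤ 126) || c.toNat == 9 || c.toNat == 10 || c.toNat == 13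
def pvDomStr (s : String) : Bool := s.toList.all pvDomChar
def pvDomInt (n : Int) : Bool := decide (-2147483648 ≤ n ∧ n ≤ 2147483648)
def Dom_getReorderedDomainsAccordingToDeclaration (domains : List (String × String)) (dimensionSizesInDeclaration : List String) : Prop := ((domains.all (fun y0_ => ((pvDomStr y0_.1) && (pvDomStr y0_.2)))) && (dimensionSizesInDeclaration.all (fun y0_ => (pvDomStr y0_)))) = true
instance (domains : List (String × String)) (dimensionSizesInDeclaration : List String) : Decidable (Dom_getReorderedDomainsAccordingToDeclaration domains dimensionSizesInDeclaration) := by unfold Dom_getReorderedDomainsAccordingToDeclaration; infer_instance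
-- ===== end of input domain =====

-- B replaces A's per-domain repeated `.index` scans over the declaration list with one pass that
-- groups declaration indices into per-size FIFO queues and pops the earliest index for each domain.

-- ===== PORT A =====
-- inner helper `getNextUnusedIndexForDimensionSize`; `startAt > len - 1` for a nonnegative int
-- startAt is exactly `len ≤ startAt`; `list[startAt:].index(v)` is `index?` of the slice
-- (none = ValueError → Python returns None, which the outer loop turns into the fallback).
def pvGetNextUnusedIndexForDimensionSize (domainSize : String) (dimensionSizesInDeclaration : List String) (usedIndices : List Int) (startAt : Nat) : Option Int :=
  if _h : dimensionSizesInDeclaration.length ≤ startAt then none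
  else
    match PySem.List.index? (PySem.List.slice dimensionSizesInDeclaration (some (startAt : Int)) none) domainSize with
    | none => none
    | some j =>
      if ((j + startAt : Nat) : Int) ∈ usedIndices then
        pvGetNextUnusedIndexForDimensionSize domainSize dimensionSizesInDeclaration usedIndices (j + startAt + 1)
      else some ((j + startAt : Nat) : Int)
termination_by dimensionSizesInDeclaration.length - startAt
decreasing_by omega

-- the `for (domainName, domainSize) in domains` loop with its `fallBackToCurrentOrder` break
-- (none = fall back); `reorderedDomains[index] = …` is pySetD (index is always in range here).
def pvFillLoop (dims : List String) (rem : List (String × String)) (reordered : List (String × String)) (used : List Int) : Option (List (String × String)) :=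
  match rem with
  | [] => some reordered
  | (domainName, domainSize) :: rest =>
    match pvGetNextUnusedIndexForDimensionSize domainSize dims used 0 with
    | none => none
    | some i => pvFillLoop dims rest (PySem.List.pySetD reordered i (domainName, domainSize)) (used ++ [i])

-- `[0] * len(domains)` holds placeholder ints Python overwrites before the list can be returned;
-- we use ("","") as the (equally unobservable) placeholder.
def getReorderedDomainsAccordingToDeclaration (domains : List (String × String)) (dimensionSizesInDeclaration : List String) : List (String × String) :=
  if dimensionSizesInDeclaration.isEmpty then domains
  else if domains.length = 0 then domains
  else if domains.length ≠ dimensionSizesInDeclaration.length then domains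
  else
    match pvFillLoop dimensionSizesInDeclaration domains (List.replicate domains.length ("", "")) [] with
    | some r => r
    | none => domains

-- ===== PORT B =====
-- `for name, size in domains: queue = queues.get(size); if not queue: return domains;
--  reordered[queue.pop(0)] = (name, size)` — `queues.get(size)` being None or [] are both `not queue`,
-- so `getD size []` covers both; `pop(0)` re-stores the tail under the same key.
def pvPlaceLoop (queues : PySem.Dict String (List Int)) (rem : List (String × String)) (reordered : List (String × String)) : Option (List (String × String)) :=
  match rem with
  | [] => some reordered
  | (domainName, domainSize) :: rest =>
    match queues.getD domainSize [] with
    | [] => none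
    | i :: is => pvPlaceLoop (queues.insert domainSize is) rest (PySem.List.pySetD reordered i (domainName, domainSize))

-- `queues.setdefault(size, []).append(i)` over `enumerate(dims)` is `modify p.2 [] (· ++ [p.1])`;
-- `[None] * len(domains)` placeholder as in port A.
def getReorderedDomainsAccordingToDeclaration_alt (domains : List (String × String)) (dimensionSizesInDeclaration : List String) : List (String × String) :=
  if dimensionSizesInDeclaration.isEmpty || domains.length != dimensionSizesInDeclaration.length then domains
  else
    let queues := (PySem.List.enumerate dimensionSizesInDeclaration 0).foldl
      (fun d p => d.modify p.2 ([] : List Int) (· ++ [p.1])) PySem.Dict.empty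
    match pvPlaceLoop queues domains (List.replicate domains.length ("", "")) with
    | some r => r
    | none => domains

-- ===== PRECONDITION & SPEC =====
def Spec_getReorderedDomainsAccordingToDeclaration (domains : List (String × String)) (dimensionSizesInDeclaration : List String) (out : List (String × String)) : Prop := out = getReorderedDomainsAccordingToDeclaration_alt domains dimensionSizesInDeclaration
instance (domains : List (String × String)) (dimensionSizesInDeclaration : List String) (out : List (String × String)) : Decidable (Spec_getReorderedDomainsAccordingToDeclaration domains dimensionSizesInDeclaration out) := by unfold Spec_getReorderedDomainsAccordingToDeclaration; infer_instance

-- ===== CLAIM (what is proved, stated in full; the proofs are below) =====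
def Claim_equal_getReorderedDomainsAccordingToDeclaration : Prop := ∀ (domains : List (String × String)) (dimensionSizesInDeclaration : List String), Dom_getReorderedDomainsAccordingToDeclaration domains dimensionSizesInDeclaration → Spec_getReorderedDomainsAccordingToDeclaration domains dimensionSizesInDeclaration (getReorderedDomainsAccordingToDeclaration domains dimensionSizesInDeclaration)

-- ===== LEMMAS AND PROOFS =====

-- the (increasing) list of indices at which `dims` holds `s`
def pvIdxs (s : String) (dims : List String) : List Int :=
  ((PySem.List.enumerate dims 0).filter (fun p => p.2 == s)).map (·.1)

-- those of them not yet consumed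
def pvAvail (s : String) (dims : List String) (used : List Int) : List Int :=
  (pvIdxs s dims).filter (fun i => !used.contains i)

theorem pv_mem_idxs {s : String} {dims : List String} {i : Int} :
    i ∈ pvIdxs s dims ↔ ∃ k, ∃ h : k < dims.length, i = (k : Int) ∧ dims[k] = s := by
  simp only [pvIdxs, List.mem_map, List.mem_filter, PySem.List.mem_enumerate_iff]
  constructor
  · rintro ⟨p, ⟨⟨k, hk, rfl⟩, hs⟩, rfl⟩
    exact ⟨k, hk, by simpa using (beq_iff_eq.mp hs)⟩
  · rintro ⟨k, hk, rfl, hs⟩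
    exact ⟨((k : Int), dims[k]), ⟨⟨k, hk, by simp⟩, beq_iff_eq.mpr hs⟩, rfl⟩

theorem pv_pairwise_idxs (s : String) (dims : List String) :
    (pvIdxs s dims).Pairwise (· < ·) := by
  have h := PySem.List.pairwise_lt_enumerate dims 0
  exact (List.pairwise_map.mpr ((h.filter _)))

theorem pv_pairwise_avail (s : String) (dims : List String) (used : List Int) :
    (pvAvail s dims used).Pairwise (· < ·) :=
  (pv_pairwise_idxs s dims).filter _

-- B's queue-building fold, characterised
theorem pv_build_queues (dims : List String) (s : String) :
    ((PySem.List.enumerate dims 0).foldl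
      (fun d p => d.modify p.2 ([] : List Int) (· ++ [p.1])) PySem.Dict.empty).getD s []
      = pvIdxs s dims := by
  have hmap : (PySem.List.enumerate dims 0).foldl
      (fun d p => d.modify p.2 ([] : List Int) (· ++ [p.1])) PySem.Dict.empty
      = ((PySem.List.enumerate dims 0).map Prod.swap).foldl
      (fun d p => d.modify p.1 ([] : List Int) (· ++ [p.2])) PySem.Dict.empty := by
    rw [List.foldl_map]
    have hfun : (fun (x : PySem.Dict String (List Int)) (y : Int × String) =>
        x.modify y.swap.1 ([] : List Int) (· ++ [y.swap.2]))
        = (fun (d : PySem.Dict String (List Int)) (p : Int × String) =>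
        d.modify p.2 ([] : List Int) (· ++ [p.1])) := by
      funext d p
      cases p
      rfl
    rw [hfun]
  rw [hmap, PySem.Dict.getD_foldl_modify_append, PySem.Dict.getD_empty, List.nil_append,
    List.filter_map, List.map_map]
  simp [pvIdxs, Function.comp_def, Prod.swap]

-- A's inner scan, characterised: the first not-yet-used occurrence index ≥ startAt
theorem pv_getNext_eq (s : String) (dims : List String) :
    ∀ (used : List Int) (startAt : Nat),
    pvGetNextUnusedIndexForDimensionSize s dims used startAt
      = ((pvIdxs s dims).filter (fun i => decide ((startAt : Int) ≤ i) && !used.contains i)).head? := by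
  intro used startAt
  fun_induction pvGetNextUnusedIndexForDimensionSize s dims used startAt with
  | case1 startAt h =>
    have : (pvIdxs s dims).filter (fun i => decide ((startAt : Int) ≤ i) && !used.contains i) = [] := by
      apply List.filter_eq_nil_iff.mpr
      intro i hi
      obtain ⟨k, hk, rfl, -⟩ := pv_mem_idxs.mp hi
      simp only [Bool.and_eq_true, decide_eq_true_eq, not_and]
      intro hle
      exfalso
      have : startAt ≤ k := by exact_mod_cast hle
      omega
    rw [this]; rfl
  | case2 startAt h hidx =>
    rw [PySem.List.slice_from_natCast] at hidx
    have hnot : s ∉ dims.drop startAt := (PySem.List.index?_eq_none_iff _ _).mp hidx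
    have : (pvIdxs s dims).filter (fun i => decide ((startAt : Int) ≤ i) && !used.contains i) = [] := by
      apply List.filter_eq_nil_iff.mpr
      intro i hi
      obtain ⟨k, hk, rfl, hks⟩ := pv_mem_idxs.mp hi
      simp only [Bool.and_eq_true, decide_eq_true_eq, not_and]
      intro hle
      exfalso
      have hk' : startAt ≤ k := by exact_mod_cast hle
      apply hnot
      have hlt : k - startAt < (dims.drop startAt).length := by
        simp only [List.length_drop]; omega
      have hgd : (dims.drop startAt)[k - startAt] = dims[startAt + (k - startAt)]'(by omega) :=
        List.getElem_drop
      have hidxeq : startAt + (k - startAt) = k := by omega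
      rw [← hks, ← getElem_congr rfl hidxeq (by omega), ← hgd]
      exact List.getElem_mem hlt
    rw [this]; rfl
  | case3 startAt h j hidx hmem ih =>
    -- the found candidate j + startAt is already used: skip past it
    rw [PySem.List.slice_from_natCast] at hidx
    obtain ⟨hj, hjs, hjmin⟩ := PySem.List.getElem_of_index?_eq_some hidx
    simp only [List.length_drop] at hj
    have hnos : ∀ k, startAt ≤ k → k < j + startAt → (hk : k < dims.length) → dims[k] ≠ s := by
      intro k hk1 hk2 hk3 hkd
      apply hjmin (k - startAt) (by omega)
      have hgd : (dims.drop startAt)[k - startAt] = dims[startAt + (k - startAt)]'(by omega) :=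
        List.getElem_drop
      rw [hgd, getElem_congr rfl (by omega : startAt + (k - startAt) = k) (by omega), hkd]
    rw [ih]
    congr 1
    apply List.filter_congr
    intro i hi
    obtain ⟨k, hk, rfl, hks⟩ := pv_mem_idxs.mp hi
    by_cases h1 : k < startAt
    · have e1 : decide ((startAt : Int) ≤ (k : Int)) = false := by
        simp only [decide_eq_false_iff_not]
        intro hle
        have : startAt ≤ k := by exact_mod_cast hle
        omega
      have e2 : decide (((j + startAt + 1 : Nat) : Int) ≤ (k : Int)) = false := by
        simp only [decide_eq_false_iff_not]
        intro hle
        have : j + startAt + 1 ≤ k := by exact_mod_cast hle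
        omega
      rw [e1, e2]
    · by_cases h2 : k < j + startAt
      · exact absurd hks (hnos k (by omega) h2 hk)
      · by_cases h3 : k = j + startAt
        · subst h3
          have : (!used.contains (((j + startAt : Nat) : Int))) = false := by
            simp only [Bool.not_eq_false']
            exact List.contains_iff_mem.mpr hmem
          rw [this, Bool.and_false, Bool.and_false]
        · have e1 : decide ((startAt : Int) ≤ ((k : Nat) : Int)) = true := by
            simp only [decide_eq_true_eq]
            exact_mod_cast (by omega : startAt ≤ k)
          have e2 : decide (((j + startAt + 1 : Nat) : Int) ≤ ((k : Nat) : Int)) = true := by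
            simp only [decide_eq_true_eq]
            exact_mod_cast (by omega : j + startAt + 1 ≤ k)
          rw [e1, e2]
  | case4 startAt h j hidx hmem =>
    -- the found candidate is free: it is the head of the filtered occurrence list
    rw [PySem.List.slice_from_natCast] at hidx
    obtain ⟨hj, hjs, hjmin⟩ := PySem.List.getElem_of_index?_eq_some hidx
    simp only [List.length_drop] at hj
    have hcs : dims[j + startAt]'(by omega) = s := by
      have hgd : (dims.drop startAt)[j] = dims[startAt + j]'(by omega) := List.getElem_drop
      rw [← hjs, hgd]
      exact getElem_congr rfl (by omega) (by omega)
    have hnos : ∀ k, startAt ≤ k → k < j + startAt → (hk : k < dims.length) → dims[k] ≠ s := by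
      intro k hk1 hk2 hk3 hkd
      apply hjmin (k - startAt) (by omega)
      have hgd : (dims.drop startAt)[k - startAt] = dims[startAt + (k - startAt)]'(by omega) :=
        List.getElem_drop
      rw [hgd, getElem_congr rfl (by omega : startAt + (k - startAt) = k) (by omega), hkd]
    have hcmem : (((j + startAt : Nat) : Int)) ∈
        (pvIdxs s dims).filter (fun i => decide ((startAt : Int) ≤ i) && !used.contains i) := by
      apply List.mem_filter.mpr
      refine ⟨pv_mem_idxs.mpr ⟨j + startAt, by omega, rfl, hcs⟩, ?_⟩
      simp only [Bool.and_eq_true, decide_eq_true_eq]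
      refine ⟨by exact_mod_cast (by omega : startAt ≤ j + startAt), ?_⟩
      simp only [Bool.not_eq_true']
      exact Bool.eq_false_iff.mpr (fun hc => hmem (List.contains_iff_mem.mp hc))
    have hpw : ((pvIdxs s dims).filter
        (fun i => decide ((startAt : Int) ≤ i) && !used.contains i)).Pairwise (· < ·) :=
      (pv_pairwise_idxs s dims).filter _
    cases hLe : (pvIdxs s dims).filter (fun i => decide ((startAt : Int) ≤ i) && !used.contains i) with
    | nil => rw [hLe] at hcmem; simp at hcmem
    | cons a t =>
      rw [hLe] at hcmem hpw
      have haL : a ∈ (pvIdxs s dims).filter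
          (fun i => decide ((startAt : Int) ≤ i) && !used.contains i) := by
        rw [hLe]; exact List.mem_cons_self
      obtain ⟨haIdx, haP⟩ := List.mem_filter.mp haL
      obtain ⟨k, hk, rfl, hks⟩ := pv_mem_idxs.mp haIdx
      simp only [Bool.and_eq_true, decide_eq_true_eq] at haP
      have hkge : startAt ≤ k := by exact_mod_cast haP.1
      have hle : (k : Int) ≤ ((j + startAt : Nat) : Int) := by
        rcases List.mem_cons.mp hcmem with hc | hc
        · exact le_of_eq hc.symm
        · exact le_of_lt ((List.pairwise_cons.mp hpw).1 _ hc)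
      have hklt : k ≤ j + startAt := by exact_mod_cast hle
      have hkeq : k = j + startAt := by
        by_contra hne
        exact hnos k hkge (by omega) hk hks
      subst hkeq
      simp [List.head?]

-- the two loops agree whenever the queues hold exactly the not-yet-used occurrence indices
theorem pv_loops_eq (dims : List String) :
    ∀ (rem reordered : List (String × String)) (used : List Int) (queues : PySem.Dict String (List Int)),
    (∀ s, queues.getD s [] = pvAvail s dims used) →
    pvPlaceLoop queues rem reordered = pvFillLoop dims rem reordered used := by
  intro rem
  induction rem with
  | nil => intro reordered used queues _; rfl
  | cons hd rest ih =>
    intro reordered used queues hinv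
    obtain ⟨dn, ds⟩ := hd
    have hnext : pvGetNextUnusedIndexForDimensionSize ds dims used 0 = (queues.getD ds []).head? := by
      rw [pv_getNext_eq, hinv ds]
      unfold pvAvail
      congr 1
      apply List.filter_congr
      intro i hi
      obtain ⟨k, hk, rfl, -⟩ := pv_mem_idxs.mp hi
      have : decide (((0 : Nat) : Int) ≤ (k : Int)) = true := by
        simp
      rw [this, Bool.true_and]
    cases hq : queues.getD ds [] with
    | nil =>
      simp only [pvPlaceLoop, pvFillLoop, hq, hnext, List.head?_nil]
    | cons i is =>
      have hAvail : pvAvail ds dims used = i :: is := by rw [← hinv ds, hq]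
      have hiIdx : i ∈ pvIdxs ds dims := (List.mem_filter.mp (hAvail ▸ List.mem_cons_self)).1
      obtain ⟨ki, hki, rfl, hkis⟩ := pv_mem_idxs.mp hiIdx
      have hnotin : ((ki : Int)) ∉ is := by
        have hpw := hAvail ▸ pv_pairwise_avail ds dims used
        intro hmem
        exact absurd ((List.pairwise_cons.mp hpw).1 _ hmem) (lt_irrefl _)
      simp only [pvPlaceLoop, pvFillLoop, hq, hnext, List.head?]
      apply ih
      intro s
      by_cases hs : s = ds
      · subst hs
        rw [PySem.Dict.getD_insert_self]
        have hstep : pvAvail s dims (used ++ [(ki : Int)])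
            = (pvAvail s dims used).filter (fun x => !(x == (ki : Int))) := by
          rw [pvAvail, pvAvail, List.filter_filter]
          apply List.filter_congr
          intro x _
          simp [Bool.and_comm]
          tauto
        rw [hstep, hAvail]
        have hfe : ((ki : Int) :: is).filter (fun x => !(x == (ki : Int)))
            = is.filter (fun x => !(x == (ki : Int))) := by
          simp
        rw [hfe]
        symm
        apply List.filter_eq_self.mpr
        intro x hx
        simp only [Bool.not_eq_true', beq_eq_false_iff_ne, ne_eq]
        intro hxe; exact hnotin (hxe ▸ hx)
      · rw [PySem.Dict.getD_insert, if_neg hs, hinv s]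
        rw [pvAvail, pvAvail]
        apply List.filter_congr
        intro x hx
        obtain ⟨kx, hkx, rfl, hkxs⟩ := pv_mem_idxs.mp hx
        have hne : (kx : Int) ≠ (ki : Int) := by
          intro he
          have : kx = ki := by exact_mod_cast he
          subst this
          exact hs (by rw [← hkxs, hkis])
        simp [hne]

-- ===== VERDICT (by name: the statement is the Claim_ definition above) =====
theorem getReorderedDomainsAccordingToDeclaration_spec : Claim_equal_getReorderedDomainsAccordingToDeclaration := by
  intro domains dims _
  unfold Spec_getReorderedDomainsAccordingToDeclaration
  unfold getReorderedDomainsAccordingToDeclaration getReorderedDomainsAccordingToDeclaration_alt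
  by_cases h1 : dims.isEmpty = true
  · have hb : (dims.isEmpty || domains.length != dims.length) = true := by rw [h1]; rfl
    rw [if_pos h1, if_pos hb]
  · by_cases h2 : domains.length = 0
    · have hne : dims.length ≠ 0 := fun h => h1 (List.isEmpty_iff_length_eq_zero.mpr h)
      have hb : (dims.isEmpty || domains.length != dims.length) = true := by
        simp only [Bool.or_eq_true, bne_iff_ne, ne_eq]
        right; omega
      rw [if_neg h1, if_pos h2, if_pos hb]
    · by_cases h3 : domains.length ≠ dims.length
      · have hb : (dims.isEmpty || domains.length != dims.length) = true := by
          simp only [Bool.or_eq_true, bne_iff_ne, ne_eq]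
          right; exact h3
        rw [if_neg h1, if_neg h2, if_pos h3, if_pos hb]
      · have hb : ¬ ((dims.isEmpty || domains.length != dims.length) = true) := by
          simp only [Bool.or_eq_true, bne_iff_ne, ne_eq]
          rintro (hc | hc)
          · exact h1 hc
          · exact h3 hc
        rw [if_neg h1, if_neg h2, if_neg h3, if_neg hb]
        have hloop : pvPlaceLoop
            ((PySem.List.enumerate dims 0).foldl
              (fun d p => d.modify p.2 ([] : List Int) (· ++ [p.1])) PySem.Dict.empty)
            domains (List.replicate domains.length ("", ""))
            = pvFillLoop dims domains (List.replicate domains.length ("", "")) [] := by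
          apply pv_loops_eq
          intro s
          rw [pv_build_queues]
          unfold pvAvail
          symm
          apply List.filter_eq_self.mpr
          intro x _
          simp
        show (match pvFillLoop dims domains (List.replicate domains.length ("", "")) [] with
          | some r => r
          | none => domains)
          = (match pvPlaceLoop
              ((PySem.List.enumerate dims 0).foldl
                (fun d p => d.modify p.2 ([] : List Int) (· ++ [p.1])) PySem.Dict.empty)
              domains (List.replicate domains.length ("", "")) with
            | some r => r
            | none => domains)
        rw [hloop]
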